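-- pv_equiv track=rewrite | github.com/Jyodann/linear-algebra | src/gui/app.py | steps_html
-- ===== SOURCE A (Python) =====
-- def steps_html(raw: str) -> str:
--     """Convert captured stdout (LaTeX-based) to HTML step cards."""
--     lines = raw.splitlines()
--     html_parts = []
--     i = 0
--     while i < len(lines):
--         line = lines[i]
--
--         if not line.strip():
--             i += 1
--             continue
--
--         # Display-math block  \[ ... \]  (possibly multi-line)
--         if line.strip().startswith("\\["):
--             block = []
--             while i < len(lines):
--                 block.append(lines[i])
--                 if lines[i].strip().endswith("\\]"):
--                     i += 1
--                     break
--                 i += 1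
--             content = "\n".join(block)
--             html_parts.append(f'<div class="step-matrix">\n{content}\n</div>')
--             continue
--
--         # Inline-math  \( ... \)  — ERO label
--         if line.strip().startswith("\\("):
--             html_parts.append(f'<div class="step-ero">{line.strip()}</div>')
--             i += 1
--             continue
--
--         stripped = line.strip()
--         if (
--             stripped.startswith("Case ")
--             or stripped == "Unique solution"
--             or stripped == "No solution"
--             or stripped.startswith("Solution with")
--         ):
--             html_parts.append(f'<div class="step-case">{stripped}</div>')
--             i += 1
--             continue
--
--         if stripped:
--             html_parts.append(f'<div class="step-text">{stripped}</div>')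
--         i += 1
--
--     return "\n".join(html_parts)
-- ===== SOURCE B (Python) =====
-- def steps_html(raw: str) -> str:
--     """Convert captured stdout (LaTeX-based) to HTML step cards."""
--     parts = []
--     block = None  # None = not inside a display-math block, else list of raw lines
--     for line in raw.splitlines():
--         if block is not None:
--             block.append(line)
--             if line.strip().endswith("\\]"):
--                 parts.append('<div class="step-matrix">\n' + "\n".join(block) + "\n</div>")
--                 block = None
--             continue
--         s = line.strip()
--         if not s:
--             continue
--         if s.startswith("\\["):
--             if s.endswith("\\]"):
--                 parts.append('<div class="step-matrix">\n' + line + "\n</div>")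
--             else:
--                 block = [line]
--         elif s.startswith("\\("):
--             parts.append(f'<div class="step-ero">{s}</div>')
--         elif (
--             s.startswith("Case ")
--             or s == "Unique solution"
--             or s == "No solution"
--             or s.startswith("Solution with")
--         ):
--             parts.append(f'<div class="step-case">{s}</div>')
--         else:
--             parts.append(f'<div class="step-text">{s}</div>')
--     if block is not None:
--         parts.append('<div class="step-matrix">\n' + "\n".join(block) + "\n</div>")
--     return "\n".join(parts)
-- ===== Notes on version B (the rewrite author's own statement) =====
-- stated objective: simpler
-- what changed: Replaced A's index-based while-loop with a nested inner block-collection loop by a single state-machine pass over the lines (in_block accumulator flag), flushing an unterminated display-math block at EOF.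
import Mathlib
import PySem

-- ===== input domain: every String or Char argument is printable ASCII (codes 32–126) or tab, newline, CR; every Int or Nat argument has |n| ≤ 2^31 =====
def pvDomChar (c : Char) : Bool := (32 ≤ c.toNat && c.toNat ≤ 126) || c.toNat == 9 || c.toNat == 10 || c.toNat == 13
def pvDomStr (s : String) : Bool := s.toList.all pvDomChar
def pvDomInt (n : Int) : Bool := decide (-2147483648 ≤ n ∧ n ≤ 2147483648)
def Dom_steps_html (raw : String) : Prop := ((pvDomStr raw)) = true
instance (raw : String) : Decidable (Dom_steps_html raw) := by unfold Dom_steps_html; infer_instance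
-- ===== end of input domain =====

-- B replaces A's index-based while-loop with a nested block-collection loop by a single
-- state-machine pass (in-block flag + accumulator) over the lines; objective: simpler, same cost.

-- shared card formatters (identical f-strings in both Pythons)
def cardMatrix (blk : List String) : String :=
  "<div class=\"step-matrix\">\n" ++ PySem.Str.join "\n" blk ++ "\n</div>"
def cardEro (s : String) : String := "<div class=\"step-ero\">" ++ s ++ "</div>"
def cardCase (s : String) : String := "<div class=\"step-case\">" ++ s ++ "</div>"
def cardText (s : String) : String := "<div class=\"step-text\">" ++ s ++ "</div>"
def isCase (s : String) : Bool :=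
  PySem.Str.startswith s "Case " || s == "Unique solution" || s == "No solution"
    || PySem.Str.startswith s "Solution with"

-- ===== PORT A =====
-- A's inner while-loop: collect lines (prefix accumulated reversed) through the first one
-- whose strip ends with "\]"; returns (block, remaining lines).
def collectA : List String → List String → List String × List String
  | acc, [] => (acc.reverse, [])
  | acc, l :: rest =>
      if PySem.Str.endswith (PySem.Str.strip l) "\\]" then ((l :: acc).reverse, rest)
      else collectA (l :: acc) rest

theorem collectA_snd_len : ∀ (xs acc : List String), (collectA acc xs).2.length ≤ xs.length := by
  intro xs
  induction xs with
  | nil => intro acc; simp [collectA]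
  | cons l rest ih =>
      intro acc
      simp only [collectA]
      split
      · simp
      · exact Nat.le_succ_of_le (ih (l :: acc))

def goA : List String → List String
  | [] => []
  | l :: rest =>
      if PySem.Str.strip l = "" then goA rest
      else if PySem.Str.startswith (PySem.Str.strip l) "\\[" then
        let p := collectA [] (l :: rest)
        cardMatrix p.1 :: goA p.2
      else if PySem.Str.startswith (PySem.Str.strip l) "\\(" then
        cardEro (PySem.Str.strip l) :: goA rest
      else if isCase (PySem.Str.strip l) then
        cardCase (PySem.Str.strip l) :: goA rest
      else if PySem.Str.strip l = "" then goA rest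
      else cardText (PySem.Str.strip l) :: goA rest
termination_by xs => xs.length
decreasing_by
  · simp
  · show (collectA [] (l :: rest)).2.length < (l :: rest).length
    simp only [collectA, List.length_cons]
    split
    · simp
    · exact Nat.lt_succ_of_le (collectA_snd_len rest [l])
  all_goals simp

def steps_html (raw : String) : String :=
  PySem.Str.join "\n" (goA (PySem.Str.splitlines raw))

-- ===== PORT B =====
-- B's single pass: state = none (outside a block) or some acc (inside, lines accumulated reversed).
def goB : Option (List String) → List String → List String
  | some acc, [] => [cardMatrix acc.reverse]          -- flush unterminated block at EOF
  | some acc, l :: rest =>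
      if PySem.Str.endswith (PySem.Str.strip l) "\\]" then
        cardMatrix (l :: acc).reverse :: goB none rest
      else goB (some (l :: acc)) rest
  | none, [] => []
  | none, l :: rest =>
      let s := PySem.Str.strip l
      if s = "" then goB none rest
      else if PySem.Str.startswith s "\\[" then
        if PySem.Str.endswith s "\\]" then
          ("<div class=\"step-matrix\">\n" ++ l ++ "\n</div>") :: goB none rest
        else goB (some [l]) rest
      else if PySem.Str.startswith s "\\(" then cardEro s :: goB none rest
      else if isCase s then cardCase s :: goB none rest
      else cardText s :: goB none rest

def steps_html_alt (raw : String) : String :=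
  PySem.Str.join "\n" (goB none (PySem.Str.splitlines raw))

-- ===== PRECONDITION & SPEC =====
def Spec_steps_html (raw : String) (out : String) : Prop := out = steps_html_alt raw
instance (raw : String) (out : String) : Decidable (Spec_steps_html raw out) := by unfold Spec_steps_html; infer_instance

-- ===== CLAIM (what is proved, stated in full; the proofs are below) =====
def Claim_equal_steps_html : Prop := ∀ (raw : String), Dom_steps_html raw → Spec_steps_html raw (steps_html raw)

-- ===== LEMMAS AND PROOFS =====

theorem join_singleton (l : String) : PySem.Str.join "\n" [l] = l := by
  simp [PySem.Str.join, PySem.Chars.join_singleton]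

-- B inside a block computes exactly A's inner while-loop result.
theorem goB_some (xs : List String) : ∀ acc,
    goB (some acc) xs = cardMatrix (collectA acc xs).1 :: goB none (collectA acc xs).2 := by
  induction xs with
  | nil => intro acc; simp [goB, collectA]
  | cons l rest ih =>
      intro acc
      simp only [goB, collectA]
      split
      · rfl
      · exact ih (l :: acc)

theorem goA_eq_goB (xs : List String) : goA xs = goB none xs := by
  induction xs using goA.induct with
  | case1 => rw [goA]; rfl
  | case2 l rest h ih =>
      rw [goA, goB]; simp only [if_pos h]; exact ih
  | case3 l rest h1 h2 p ih =>
      rw [goA, goB]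
      simp only [if_neg h1, if_pos h2]
      by_cases he : PySem.Str.endswith (PySem.Str.strip l) "\\]"
      · have hc : collectA [] (l :: rest) = ([l], rest) := by
          simp only [collectA]; rw [if_pos he]; rfl
        rw [if_pos he]
        have ih' : goA rest = goB none rest := by simpa only [p, hc] using ih
        simp only [hc, cardMatrix, join_singleton]
        exact congrArg _ ih'
      · have hc : collectA [] (l :: rest) = collectA [l] rest := by
          simp only [collectA]; rw [if_neg he]
        rw [if_neg he, goB_some]
        have ih' : goA (collectA [l] rest).2 = goB none (collectA [l] rest).2 := by
          simpa only [p, hc] using ih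
        simp only [hc]
        exact congrArg _ ih'
  | case4 l rest h1 h2 h3 ih =>
      rw [goA, goB]; simp only [if_neg h1, if_neg h2, if_pos h3]; exact congrArg _ ih
  | case5 l rest h1 h2 h3 h4 ih =>
      rw [goA, goB]; simp only [if_neg h1, if_neg h2, if_neg h3, if_pos h4]; exact congrArg _ ih
  | case6 l rest h1 h2 h3 h4 h5 ih => exact absurd h5 h1
  | case7 l rest h1 h2 h3 h4 h5 ih =>
      rw [goA, goB]; simp only [if_neg h1, if_neg h2, if_neg h3, if_neg h4]
      exact congrArg _ ih

-- ===== VERDICT (by name: the statement is the Claim_ definition above) =====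
theorem steps_html_spec : Claim_equal_steps_html := by
  intro raw _
  unfold Spec_steps_html steps_html steps_html_alt
  rw [goA_eq_goB]
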